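-- pv_equiv track=rewrite | github.com/aghabidareh/MiniPython | Pentagon Numbers.py | generate_pentagonal_numbers
-- ===== SOURCE A (Python) =====
-- def generate_pentagonal_numbers(limit):
--     pentagonal_numbers = []
--     n = 1
--     while True:
--         p_n = n * (3 * n - 1) // 2
--         if p_n > limit:
--             break
--         pentagonal_numbers.append(p_n)
--         n += 1
--     return pentagonal_numbers
-- ===== SOURCE B (Python) =====
-- def generate_pentagonal_numbers(limit):
--     # Find the count of terms by binary search instead of generating until overshoot.
--     if limit < 1:
--         return []
--     lo, hi = 1, limit + 1  # invariant: P(lo) <= limit < P(hi), P(n) = n*(3n-1)//2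
--     while hi - lo > 1:
--         mid = lo + (hi - lo) // 2
--         if mid * (3 * mid - 1) // 2 <= limit:
--             lo = mid
--         else:
--             hi = mid
--     return [n * (3 * n - 1) // 2 for n in range(1, lo + 1)]
-- ===== Notes on version B (the rewrite author's own statement) =====
-- stated objective: alternative
-- what changed: Instead of generating pentagonal numbers one by one until the first term exceeds the limit, B binary-searches for the index of the largest pentagonal number not exceeding the limit and then emits the whole list with a single comprehension over that range.
import Mathlib
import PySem

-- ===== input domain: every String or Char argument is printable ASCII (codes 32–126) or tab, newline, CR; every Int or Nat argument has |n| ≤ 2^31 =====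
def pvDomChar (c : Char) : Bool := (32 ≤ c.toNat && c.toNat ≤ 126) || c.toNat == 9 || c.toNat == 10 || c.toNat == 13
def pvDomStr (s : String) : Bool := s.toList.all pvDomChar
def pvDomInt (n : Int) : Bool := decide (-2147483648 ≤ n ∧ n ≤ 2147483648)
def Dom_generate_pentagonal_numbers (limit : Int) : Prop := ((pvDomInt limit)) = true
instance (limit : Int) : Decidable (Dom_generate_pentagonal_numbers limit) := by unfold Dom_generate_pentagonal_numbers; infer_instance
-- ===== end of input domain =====

-- B replaces A's generate-until-overshoot loop by a binary search for the term
-- count followed by one comprehension (objective: alternative decomposition).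

-- n * (3*n - 1) is even, so floordiv by 2 is exact and at least n (used for termination of A's loop)
theorem pvPentLoop_le (n : Int) : n ≤ PySem.Int.floordiv (n * (3 * n - 1)) 2 := by
  rw [PySem.Int.floordiv_eq_ediv_of_pos (by norm_num)]
  rcases Int.even_or_odd n with ⟨q, rfl⟩ | ⟨q, rfl⟩
  · rw [show (q + q) * (3 * (q + q) - 1) = 2 * (q * (6 * q - 1)) from by ring,
      Int.mul_ediv_cancel_left _ (by norm_num)]
    by_cases h : q ≤ 0
    · nlinarith [sq_nonneg q]
    · nlinarith [sq_nonneg (q - 1)]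
  · rw [show (2 * q + 1) * (3 * (2 * q + 1) - 1) = 2 * ((2 * q + 1) * (3 * q + 1)) from by ring,
      Int.mul_ediv_cancel_left _ (by norm_num)]
    by_cases h : q ≤ 0
    · nlinarith [sq_nonneg q]
    · nlinarith [sq_nonneg (q - 1)]

-- ===== PORT A =====
def pentLoopA (limit n : Int) (acc : List Int) : List Int :=
  let p := PySem.Int.floordiv (n * (3 * n - 1)) 2
  if p > limit then acc
  else pentLoopA limit (n + 1) (acc ++ [p])
termination_by (limit + 1 - n).toNat
decreasing_by
  have := pvPentLoop_le n
  simp only [not_lt] at *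
  omega

def generate_pentagonal_numbers (limit : Int) : List Int :=
  pentLoopA limit 1 []

-- ===== PORT B =====
def bsearchLoop (limit lo hi : Int) : Int :=
  if hi - lo > 1 then
    let mid := lo + PySem.Int.floordiv (hi - lo) 2
    if PySem.Int.floordiv (mid * (3 * mid - 1)) 2 ≤ limit then bsearchLoop limit mid hi
    else bsearchLoop limit lo mid
  else lo
termination_by (hi - lo).toNat
decreasing_by
  all_goals
    rename_i h _
    rw [PySem.Int.floordiv_eq_ediv_of_pos (by norm_num)] at *
    omega

def generate_pentagonal_numbers_alt (limit : Int) : List Int :=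
  if limit < 1 then []
  else
    let lo := bsearchLoop limit 1 (limit + 1)
    (PySem.List.pyRange 1 (lo + 1) 1).map (fun n => PySem.Int.floordiv (n * (3 * n - 1)) 2)

-- ===== PRECONDITION & SPEC =====
def Spec_generate_pentagonal_numbers (limit : Int) (out : List Int) : Prop := out = generate_pentagonal_numbers_alt limit
instance (limit : Int) (out : List Int) : Decidable (Spec_generate_pentagonal_numbers limit out) := by unfold Spec_generate_pentagonal_numbers; infer_instance

-- ===== CLAIM (what is proved, stated in full; the proofs are below) =====
def Claim_equal_generate_pentagonal_numbers : Prop := ∀ (limit : Int), Dom_generate_pentagonal_numbers limit → Spec_generate_pentagonal_numbers limit (generate_pentagonal_numbers limit)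

-- ===== LEMMAS AND PROOFS =====

def pent (n : Int) : Int := PySem.Int.floordiv (n * (3 * n - 1)) 2

theorem two_mul_pent (n : Int) : 2 * pent n = n * (3 * n - 1) := by
  unfold pent
  rw [PySem.Int.floordiv_eq_ediv_of_pos (by norm_num)]
  rcases Int.even_or_odd n with ⟨q, rfl⟩ | ⟨q, rfl⟩
  · rw [show (q + q) * (3 * (q + q) - 1) = 2 * (q * (6 * q - 1)) from by ring,
      Int.mul_ediv_cancel_left _ (by norm_num)]
  · rw [show (2 * q + 1) * (3 * (2 * q + 1) - 1) = 2 * ((2 * q + 1) * (3 * q + 1)) from by ring,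
      Int.mul_ediv_cancel_left _ (by norm_num)]

theorem pent_mono {a b : Int} (h : a ≤ b) (ha : 0 ≤ a) : pent a ≤ pent b := by
  have h2 : 2 * pent a ≤ 2 * pent b := by
    rw [two_mul_pent, two_mul_pent]
    rcases eq_or_lt_of_le h with rfl | hlt
    · exact le_rfl
    · nlinarith [mul_nonneg (by omega : (0:Int) ≤ b - a) (by omega : (0:Int) ≤ 3 * a + 3 * b - 1)]
  omega

-- A's loop appends pent n, …, pent N to acc when those stay ≤ limit and pent (N+1) > limit
theorem pentLoopA_eq (limit N : Int) (hub : limit < pent (N + 1)) :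
    ∀ (n : Int) (acc : List Int), n ≤ N + 1 →
    (∀ m, n ≤ m → m ≤ N → pent m ≤ limit) →
    pentLoopA limit n acc = acc ++ (PySem.List.pyRange n (N + 1) 1).map pent := by
  suffices h : ∀ (k : Nat) (n : Int) (acc : List Int), (N + 1 - n).toNat ≤ k → n ≤ N + 1 →
      (∀ m, n ≤ m → m ≤ N → pent m ≤ limit) →
      pentLoopA limit n acc = acc ++ (PySem.List.pyRange n (N + 1) 1).map pent from
    fun n acc h1 h2 => h (N + 1 - n).toNat n acc le_rfl h1 h2
  intro k
  induction k with
  | zero =>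
    intro n acc hk hle _
    have hn : n = N + 1 := by omega
    subst hn
    rw [pentLoopA]
    have : PySem.List.pyRange (N + 1) (N + 1) 1 = [] := by
      rw [PySem.List.pyRange_one]; simp
    simp only [this, List.map_nil, List.append_nil]
    rw [if_pos (by exact hub)]
  | succ k ih =>
    intro n acc hk hle hall
    rw [pentLoopA]
    by_cases hp : pent n > limit
    · have hn : n = N + 1 := by
        by_contra hne
        exact absurd (hall n le_rfl (by omega)) (not_le.mpr hp)
      subst hn
      have : PySem.List.pyRange (N + 1) (N + 1) 1 = [] := by
        rw [PySem.List.pyRange_one]; simp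
      simp only [this, List.map_nil, List.append_nil]
      rw [if_pos (by exact hp)]
    · have hlt : n < N + 1 := by
        rcases lt_or_eq_of_le hle with h | h
        · exact h
        · subst h; exact absurd hub (by simpa using hp)
      rw [if_neg (by exact hp)]
      rw [show PySem.Int.floordiv (n * (3 * n - 1)) 2 = pent n from rfl]
      rw [ih (n + 1) (acc ++ [pent n]) (by omega) (by omega)
        (fun m h1 h2 => hall m (by omega) h2)]
      rw [PySem.List.pyRange_one_cons hlt]
      simp

theorem bsearchLoop_spec (limit : Int) :
    ∀ (lo hi : Int), 0 ≤ lo → lo < hi → pent lo ≤ limit → limit < pent hi →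
    0 ≤ bsearchLoop limit lo hi ∧ pent (bsearchLoop limit lo hi) ≤ limit ∧
      limit < pent (bsearchLoop limit lo hi + 1) := by
  suffices h : ∀ (k : Nat) (lo hi : Int), (hi - lo).toNat ≤ k → 0 ≤ lo → lo < hi →
      pent lo ≤ limit → limit < pent hi →
      0 ≤ bsearchLoop limit lo hi ∧ pent (bsearchLoop limit lo hi) ≤ limit ∧
        limit < pent (bsearchLoop limit lo hi + 1) from
    fun lo hi h0 h1 h2 h3 => h (hi - lo).toNat lo hi le_rfl h0 h1 h2 h3
  intro k
  induction k with
  | zero =>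
    intro lo hi hk h0 h1 _ _
    omega
  | succ k ih =>
    intro lo hi hk h0 h1 hlo hhi
    rw [bsearchLoop]
    by_cases hgap : hi - lo > 1
    · rw [if_pos hgap]
      have hmid : lo < lo + PySem.Int.floordiv (hi - lo) 2 ∧
          lo + PySem.Int.floordiv (hi - lo) 2 < hi := by
        rw [PySem.Int.floordiv_eq_ediv_of_pos (by norm_num)]
        omega
      set mid := lo + PySem.Int.floordiv (hi - lo) 2 with hmiddef
      by_cases hc : PySem.Int.floordiv (mid * (3 * mid - 1)) 2 ≤ limit
      · rw [if_pos hc]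
        exact ih mid hi (by omega) (by omega) hmid.2 hc hhi
      · rw [if_neg hc]
        exact ih lo mid (by omega) h0 hmid.1 hlo (by exact not_le.mp hc)
    · rw [if_neg hgap]
      have : hi = lo + 1 := by omega
      exact ⟨h0, hlo, this ▸ hhi⟩

-- ===== VERDICT (by name: the statement is the Claim_ definition above) =====
theorem generate_pentagonal_numbers_spec : Claim_equal_generate_pentagonal_numbers := by
  intro limit _
  unfold Spec_generate_pentagonal_numbers generate_pentagonal_numbers generate_pentagonal_numbers_alt
  by_cases hlim : limit < 1
  · rw [if_pos hlim]
    have hub : limit < pent (0 + 1) := by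
      have h1 : pent (0 + 1) = 1 := by decide
      omega
    rw [pentLoopA_eq limit 0 hub 1 [] (by norm_num) (fun m h1 h2 => by omega)]
    rw [PySem.List.pyRange_one]
    simp
  · rw [if_neg hlim]
    rw [not_lt] at hlim
    have hp1 : pent 1 ≤ limit := by
      have : pent 1 = 1 := by decide
      omega
    have hub : limit < pent (limit + 1) := by
      have := pvPentLoop_le (limit + 1)
      have h2 : limit + 1 ≤ pent (limit + 1) := this
      omega
    obtain ⟨hr0, hrle, hrgt⟩ := bsearchLoop_spec limit 1 (limit + 1) (by norm_num) (by omega) hp1 hub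
    have hmain := pentLoopA_eq limit (bsearchLoop limit 1 (limit + 1)) hrgt 1 []
      (by omega) (fun m h1 h2 => le_trans (pent_mono h2 (by omega)) hrle)
    rw [hmain]
    simp [pent]
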